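-- pv_equiv track=rewrite | github.com/matej-kaska/ujepsoft | backend/utils/issues/utils.py | insert_div_after_lists
-- ===== SOURCE A (Python) =====
-- def insert_div_after_lists(md_content: str) -> str:
--   """
--   This method inserts a div after every list in the markdown content, must
--   be done, because when there are two lists in a row, they are not separated
--   """
--   lines = md_content.split('\n')
--   new_lines = []
--   in_list = False
--
--   for line in lines:
--     stripped_line = line.strip()
--     if stripped_line.startswith(('-', '*', '1.', '2.', '3.', '4.', '5.', '6.', '7.', '8.', '9.')):
--       in_list = True
--       new_lines.append(line)
--     elif in_list and not stripped_line:
--       in_list = False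
--       new_lines.append('<div></div>')
--       new_lines.append('')
--     else:
--       new_lines.append(line)
--
--   if in_list:
--     new_lines.append('<div></div>')
--
--   return '\n'.join(new_lines)
-- ===== SOURCE B (Python) =====
-- from itertools import groupby
--
-- MARKERS = ('-', '*', '1.', '2.', '3.', '4.', '5.', '6.', '7.', '8.', '9.')
--
-- def insert_div_after_lists(md_content: str) -> str:
--   """Walk maximal runs of non-blank / blank lines instead of a per-line flag."""
--   out = []
--   prev_block_is_list = False
--   for is_text, grp in groupby(md_content.split('\n'), key=lambda l: bool(l.strip())):
--     block = list(grp)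
--     if is_text:
--       out.extend(block)
--       prev_block_is_list = any(l.strip().startswith(MARKERS) for l in block)
--     elif prev_block_is_list:
--       out.append('<div></div>')
--       out.append('')
--       out.extend(block[1:])
--       prev_block_is_list = False
--     else:
--       out.extend(block)
--   if prev_block_is_list:
--     out.append('<div></div>')
--   return '\n'.join(out)
-- ===== Notes on version B (the rewrite author's own statement) =====
-- stated objective: alternative
-- what changed: Replaces A's per-line in_list flag scan by an itertools.groupby decomposition into maximal blank/non-blank line runs with one flag recording whether the preceding non-blank block contained a list line.
import Mathlib
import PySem

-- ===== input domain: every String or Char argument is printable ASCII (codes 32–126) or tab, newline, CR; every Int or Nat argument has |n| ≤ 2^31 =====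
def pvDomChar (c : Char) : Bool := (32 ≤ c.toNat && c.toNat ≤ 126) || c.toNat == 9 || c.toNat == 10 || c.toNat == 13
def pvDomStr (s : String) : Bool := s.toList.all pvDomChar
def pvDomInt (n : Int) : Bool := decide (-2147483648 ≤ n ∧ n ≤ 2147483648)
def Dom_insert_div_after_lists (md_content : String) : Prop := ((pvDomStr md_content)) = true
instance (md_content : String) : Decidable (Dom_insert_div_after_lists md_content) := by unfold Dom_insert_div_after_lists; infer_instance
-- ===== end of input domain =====

-- B walks maximal runs of non-blank/blank lines with one per-block flag instead of A's
-- per-line in_list scan (objective: alternative decomposition, same cost).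

-- helpers shared by both sources: the marker test, the split into lines, the final div step
def pvMarkers : List String := ["-", "*", "1.", "2.", "3.", "4.", "5.", "6.", "7.", "8.", "9."]
def pvIsMarker (s : String) : Bool := pvMarkers.any (fun p => PySem.Str.startswith s p)
def pvLines (md : String) : List String := (PySem.Str.split? md "\n").getD []  -- sep ≠ "", always some
def pvFinish (st : List String × Bool) : List String :=
  if st.2 then st.1 ++ ["<div></div>"] else st.1

-- ===== PORT A =====
def pvAStep (st : List String × Bool) (line : String) : List String × Bool :=
  let s := PySem.Str.strip line
  if pvIsMarker s then (st.1 ++ [line], true)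
  else if st.2 && (s == "") then (st.1 ++ ["<div></div>", ""], false)
  else (st.1 ++ [line], st.2)

def insert_div_after_lists (md_content : String) : String :=
  PySem.Str.join "\n" (pvFinish ((pvLines md_content).foldl pvAStep ([], false)))

-- ===== PORT B =====
def pvIsText (l : String) : Bool := !(PySem.Str.strip l == "")

-- itertools.groupby over blankness: maximal runs of lines with equal key
def pvGroupRuns : List String → List (Bool × List String)
  | [] => []
  | l :: ls =>
    (pvIsText l, l :: ls.takeWhile (fun x => pvIsText x == pvIsText l)) ::
      pvGroupRuns (ls.dropWhile (fun x => pvIsText x == pvIsText l))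
termination_by ls => ls.length
decreasing_by
  exact Nat.lt_succ_of_le (List.length_dropWhile_le ..)

def pvBRun (st : List String × Bool) (r : Bool × List String) : List String × Bool :=
  if r.1 then (st.1 ++ r.2, r.2.any (fun l => pvIsMarker (PySem.Str.strip l)))
  else if st.2 then (st.1 ++ ["<div></div>", ""] ++ r.2.tail, false)
  else (st.1 ++ r.2, st.2)

def insert_div_after_lists_alt (md_content : String) : String :=
  PySem.Str.join "\n" (pvFinish ((pvGroupRuns (pvLines md_content)).foldl pvBRun ([], false)))

-- ===== PRECONDITION & SPEC =====
def Spec_insert_div_after_lists (md_content : String) (out : String) : Prop := out = insert_div_after_lists_alt md_content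
instance (md_content : String) (out : String) : Decidable (Spec_insert_div_after_lists md_content out) := by unfold Spec_insert_div_after_lists; infer_instance

-- ===== CLAIM (what is proved, stated in full; the proofs are below) =====
def Claim_equal_insert_div_after_lists : Prop := ∀ (md_content : String), Dom_insert_div_after_lists md_content → Spec_insert_div_after_lists md_content (insert_div_after_lists md_content)

-- ===== LEMMAS AND PROOFS =====
set_option maxHeartbeats 1000000

-- a blank (stripped-empty) line is never a marker line
theorem pv_marker_blank (l : String) (h : pvIsText l = false) :
    pvIsMarker (PySem.Str.strip l) = false := by
  have : PySem.Str.strip l = "" := by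
    simpa [pvIsText] using h
  rw [this]
  decide

-- A's loop over a run of non-blank lines appends the run and or-s in its marker flag
theorem pv_a_text_run (run : List String) (acc : List String) (f : Bool)
    (h : ∀ l ∈ run, pvIsText l = true) :
    run.foldl pvAStep (acc, f) =
      (acc ++ run, f || run.any (fun l => pvIsMarker (PySem.Str.strip l))) := by
  induction run generalizing acc f with
  | nil => simp
  | cons l ls ih =>
    have hl : pvIsText l = true := h l (by simp)
    have hne : ¬ (PySem.Str.strip l == "") = true := by
      simpa [pvIsText] using hl
    by_cases hm : pvIsMarker (PySem.Str.strip l) = true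
    · simp only [List.foldl_cons, pvAStep, hm, if_true]
      rw [ih _ _ (fun x hx => h x (by simp [hx]))]
      simp [hm]
    · simp only [List.foldl_cons, pvAStep]
      rw [if_neg (by simpa using hm)]
      rw [if_neg (by simp [hne])]
      rw [ih _ _ (fun x hx => h x (by simp [hx]))]
      simp [Bool.eq_false_iff.mpr hm, List.append_assoc]

-- A's loop over a run of blank lines with the flag clear copies the run
theorem pv_a_blank_run_false (run : List String) (acc : List String)
    (h : ∀ l ∈ run, pvIsText l = false) :
    run.foldl pvAStep (acc, false) = (acc ++ run, false) := by
  induction run generalizing acc with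
  | nil => simp
  | cons l ls ih =>
    have hm := pv_marker_blank l (h l (by simp))
    simp only [List.foldl_cons, pvAStep]
    rw [if_neg (by simp [hm]), if_neg (by simp)]
    rw [ih _ (fun x hx => h x (by simp [hx]))]
    simp [List.append_assoc]

-- A's loop over a blank run with the flag set: div + empty line replace the first blank
theorem pv_a_blank_run_true (l : String) (ls : List String) (acc : List String)
    (h : ∀ x ∈ l :: ls, pvIsText x = false) :
    (l :: ls).foldl pvAStep (acc, true) = (acc ++ ["<div></div>", ""] ++ ls, false) := by
  have hm := pv_marker_blank l (h l (by simp))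
  have he : (PySem.Str.strip l == "") = true := by
    have := h l (by simp); simpa [pvIsText] using this
  simp only [List.foldl_cons, pvAStep]
  rw [if_neg (by simp [hm]), if_pos (by simp [he])]
  rw [pv_a_blank_run_false ls _ (fun x hx => h x (by simp [hx]))]

theorem pv_dropWhile_head {p : String → Bool} (l : List String) (x : String)
    (h : (l.dropWhile p).head? = some x) : p x = false := by
  induction l with
  | nil => simp at h
  | cons a as ih =>
    by_cases hp : p a = true
    · rw [List.dropWhile_cons_of_pos hp] at h; exact ih h
    · rw [List.dropWhile_cons_of_neg hp] at h
      simp at h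
      simpa [← h] using hp

-- the core induction: A's per-line fold equals B's per-run fold, provided the flag
-- can only be set when the next line (if any) is blank — true at every run boundary
theorem pv_main (n : Nat) :
    ∀ (lines : List String), lines.length ≤ n → ∀ (acc : List String) (f : Bool),
      (f = true → ∀ h, lines.head? = some h → pvIsText h = false) →
      lines.foldl pvAStep (acc, f) = (pvGroupRuns lines).foldl pvBRun (acc, f) := by
  induction n with
  | zero =>
    intro lines hn acc f _
    have : lines = [] := List.eq_nil_of_length_eq_zero (Nat.le_zero.mp hn)
    subst this; simp [pvGroupRuns]
  | succ n ih =>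
    intro lines hn acc f hf
    match lines with
    | [] => simp [pvGroupRuns]
    | l :: ls =>
      have hgroup : pvGroupRuns (l :: ls) =
          (pvIsText l, l :: ls.takeWhile (fun x => pvIsText x == pvIsText l)) ::
            pvGroupRuns (ls.dropWhile (fun x => pvIsText x == pvIsText l)) := by
        rw [pvGroupRuns]
      have hsplit : l :: ls =
          (l :: ls.takeWhile (fun x => pvIsText x == pvIsText l)) ++
            ls.dropWhile (fun x => pvIsText x == pvIsText l) := by
        simp [List.takeWhile_append_dropWhile]
      have hrestlen : (ls.dropWhile (fun x => pvIsText x == pvIsText l)).length ≤ n := by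
        have h1 : (ls.dropWhile (fun x => pvIsText x == pvIsText l)).length ≤ ls.length :=
          List.length_dropWhile_le ..
        have h2 : ls.length ≤ n := by simpa using hn
        omega
      conv_lhs => rw [hsplit, List.foldl_append]
      conv_rhs => rw [hgroup, List.foldl_cons]
      rcases Bool.eq_false_or_eq_true (pvIsText l) with hkk | hkk
      · -- non-blank run: the flag entering it must be clear
        simp only [hkk] at hrestlen ⊢
        have hf0 : f = false := by
          cases f
          · rfl
          · have := hf rfl l rfl
            rw [hkk] at this
            exact absurd this (by simp)
        subst hf0
        have hruntext : ∀ x ∈ l :: ls.takeWhile (fun x => pvIsText x == true),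
            pvIsText x = true := by
          intro x hx
          rcases List.mem_cons.mp hx with rfl | hx
          · exact hkk
          · simpa using List.mem_takeWhile_imp hx
        rw [pv_a_text_run (l :: ls.takeWhile (fun x => pvIsText x == true)) acc false hruntext]
        have hB : pvBRun (acc, false)
            ((true : Bool), l :: ls.takeWhile (fun x => pvIsText x == true)) =
            (acc ++ (l :: ls.takeWhile (fun x => pvIsText x == true)),
              (l :: ls.takeWhile (fun x => pvIsText x == true)).any
                (fun l => pvIsMarker (PySem.Str.strip l))) := by
          simp [pvBRun]
        rw [hB, Bool.false_or]
        refine ih _ hrestlen _ _ ?_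
        intro _ h hh
        have := pv_dropWhile_head ls h hh
        simpa using this
      · -- blank run
        simp only [hkk] at hrestlen ⊢
        have hrunblank : ∀ x ∈ l :: ls.takeWhile (fun x => pvIsText x == false),
            pvIsText x = false := by
          intro x hx
          rcases List.mem_cons.mp hx with rfl | hx
          · exact hkk
          · simpa using List.mem_takeWhile_imp hx
        cases f with
        | false =>
          rw [pv_a_blank_run_false _ acc hrunblank]
          have hB : pvBRun (acc, false)
              ((false : Bool), l :: ls.takeWhile (fun x => pvIsText x == false)) =
              (acc ++ (l :: ls.takeWhile (fun x => pvIsText x == false)), false) := by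
            simp [pvBRun]
          rw [hB]
          exact ih _ hrestlen _ _ (fun h => nomatch h)
        | true =>
          rw [pv_a_blank_run_true _ _ acc hrunblank]
          have hB : pvBRun (acc, true)
              ((false : Bool), l :: ls.takeWhile (fun x => pvIsText x == false)) =
              (acc ++ ["<div></div>", ""] ++ ls.takeWhile (fun x => pvIsText x == false),
                false) := by
            simp [pvBRun]
          rw [hB]
          exact ih _ hrestlen _ _ (fun h => nomatch h)
-- ===== VERDICT (by name: the statement is the Claim_ definition above) =====
theorem insert_div_after_lists_spec : Claim_equal_insert_div_after_lists := by
  intro md _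
  show insert_div_after_lists md = insert_div_after_lists_alt md
  unfold insert_div_after_lists insert_div_after_lists_alt
  rw [pv_main (pvLines md).length (pvLines md) le_rfl [] false (fun h => nomatch h)]
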